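-- pv_equiv track=rewrite | github.com/Niach/mutavax | backend/tests/validation/stage7/test_reference_replay.py | _estimate_poly_a_len
-- ===== SOURCE A (Python) =====
-- def _estimate_poly_a_len(full_nt: str) -> int:
--     """Count the trailing run of A's (intentional poly-A tail) so scanners
--     can exclude it from homopolymer and GC-window rules."""
--     n = 0
--     for base in reversed(full_nt):
--         if base == "A":
--             n += 1
--         else:
--             break
--     return n
-- ===== SOURCE B (Python) =====
-- def _estimate_poly_a_len(full_nt: str) -> int:
--     return len(full_nt) - len(full_nt.rstrip("A"))
-- ===== Notes on version B (the rewrite author's own statement) =====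
-- stated objective: idiomatic
-- what changed: Replaces the reversed-iteration counter loop with a length difference: strip all trailing 'A' characters with rstrip and return how many were removed.
import Mathlib
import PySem

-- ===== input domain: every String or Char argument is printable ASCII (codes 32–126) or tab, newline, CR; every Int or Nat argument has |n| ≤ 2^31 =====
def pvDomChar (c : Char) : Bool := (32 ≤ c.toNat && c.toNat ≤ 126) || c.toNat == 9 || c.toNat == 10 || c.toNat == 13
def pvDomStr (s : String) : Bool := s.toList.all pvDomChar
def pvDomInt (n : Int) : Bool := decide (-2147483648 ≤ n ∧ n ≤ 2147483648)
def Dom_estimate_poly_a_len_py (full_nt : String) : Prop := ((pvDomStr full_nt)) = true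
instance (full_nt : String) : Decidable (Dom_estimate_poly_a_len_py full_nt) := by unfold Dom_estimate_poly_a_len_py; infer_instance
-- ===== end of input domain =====

-- B replaces A's reversed-iteration counter loop with a length difference after rstrip("A") (idiomatic).


-- ===== PORT A =====
-- the 'for base in reversed(full_nt): if == "A": n += 1 else: break' loop
def pvCountA : List Char → Int → Int
  | [], n => n
  | c :: rest, n => if c == 'A' then pvCountA rest (n + 1) else n

def estimate_poly_a_len_py (full_nt : String) : Int :=
  pvCountA full_nt.toList.reverse 0

-- ===== PORT B =====
-- rstrip("A") ported by hand as reverse / dropWhile (· == 'A') / reverse: exact, since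
-- Python's rstrip("A") removes exactly the maximal trailing run of 'A' characters.
def estimate_poly_a_len_py_alt (full_nt : String) : Int :=
  (full_nt.toList.length : Int)
    - ((full_nt.toList.reverse.dropWhile (· == 'A')).reverse.length : Int)

-- ===== PRECONDITION & SPEC =====
def Spec_estimate_poly_a_len_py (full_nt : String) (out : Int) : Prop := out = estimate_poly_a_len_py_alt full_nt
instance (full_nt : String) (out : Int) : Decidable (Spec_estimate_poly_a_len_py full_nt out) := by unfold Spec_estimate_poly_a_len_py; infer_instance

-- ===== CLAIM (what is proved, stated in full; the proofs are below) =====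
def Claim_equal_estimate_poly_a_len_py : Prop := ∀ (full_nt : String), Dom_estimate_poly_a_len_py full_nt → Spec_estimate_poly_a_len_py full_nt (estimate_poly_a_len_py full_nt)

-- ===== LEMMAS AND PROOFS =====
theorem pvCountA_eq_takeWhile (l : List Char) (n : Int) :
    pvCountA l n = n + ((l.takeWhile (· == 'A')).length : Int) := by
  induction l generalizing n with
  | nil => simp [pvCountA]
  | cons c rest ih =>
    by_cases h : c == 'A' <;> (simp [pvCountA, List.takeWhile, h, ih]; try omega)

-- ===== VERDICT (by name: the statement is the Claim_ definition above) =====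
theorem estimate_poly_a_len_py_spec : Claim_equal_estimate_poly_a_len_py := by
  intro s _
  unfold Spec_estimate_poly_a_len_py estimate_poly_a_len_py estimate_poly_a_len_py_alt
  rw [pvCountA_eq_takeWhile]
  have h := List.takeWhile_append_dropWhile (p := (· == 'A')) (l := s.toList.reverse)
  have hlen := congrArg List.length h
  simp only [List.length_append, List.length_reverse] at hlen
  simp only [List.length_reverse]
  omega
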